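-- pv_equiv track=rewrite | github.com/jesicatjan/Downloading-Attachments-From-Gmail-And-Appending-To-Spreadsheet | helper.py | extractDataFrom2dArray
-- ===== SOURCE A (Python) =====
-- def extractDataFrom2dArray(wholeSheetData):
--     data = []
--     count = 0
--     number_of_rows = 0
--     start = 0
--
--     for row in wholeSheetData:
--         if start == 0:
--             if row[0] == 'Total records counts':
--                 number_of_rows = row[1]
--                 if number_of_rows == 0:
--                     return None
--             if row[0] == 'Product':
--                 start = 1
--         else:
--             if count == number_of_rows:
--                 return data
--             else:
--                 row_data = []
--                 for element in row:
--                     row_data.append(element)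
--                 data.append(row_data)
--                 count += 1
--     return data
-- ===== SOURCE B (Python) =====
-- def extractDataFrom2dArray(wholeSheetData):
--     for i, row in enumerate(wholeSheetData):
--         if row[0] == 'Product':
--             return wholeSheetData[i + 1:]
--     return []
-- ===== Notes on version B (the rewrite author's own statement) =====
-- stated objective: simpler
-- what changed: Replaces A's stateful single pass with four mutable loop variables (accumulator, count, number_of_rows, start flag) by locating the 'Product' marker row and returning one slice of everything after it; Pre_ excludes only inputs where A raises IndexError (an empty row, or a too-short 'Total records counts' row, before the marker).
-- intended difference: On sheets whose 'Product' marker row is followed by data rows but not preceded by a 'Total records counts' row, A returns [] (its number_of_rows default 0 makes count == number_of_rows fire immediately, since a real sheet count cell is a string this default is the only int ever compared), while B returns the rows after the marker, which is the intended extraction. — e.g. on extractDataFrom2dArray([["Product"], ["a"]]): A returns some [], B returns some [["a"]]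
import Mathlib
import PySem

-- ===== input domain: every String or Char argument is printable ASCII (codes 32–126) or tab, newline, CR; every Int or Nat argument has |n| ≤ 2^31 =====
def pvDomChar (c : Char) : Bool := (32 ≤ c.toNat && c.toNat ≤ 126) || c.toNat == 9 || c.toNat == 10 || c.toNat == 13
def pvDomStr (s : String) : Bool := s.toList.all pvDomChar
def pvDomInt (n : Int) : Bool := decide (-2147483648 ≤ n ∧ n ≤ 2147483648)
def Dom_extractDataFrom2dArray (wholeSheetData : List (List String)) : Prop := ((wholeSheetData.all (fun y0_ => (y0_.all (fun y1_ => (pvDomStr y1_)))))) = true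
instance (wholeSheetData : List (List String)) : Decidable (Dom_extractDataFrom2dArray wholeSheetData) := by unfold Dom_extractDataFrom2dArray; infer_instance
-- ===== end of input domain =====

-- B finds the 'Product' marker row and returns one slice of everything after it; return-value
-- equivalence only. A's quirk of returning [] when no count row precedes the marker is stated
-- as an intended difference (D_ below).

-- ===== PORT A =====
-- Python's number_of_rows is the int 0 (encoded `none`) or a cell string row[1] (encoded `some s`);
-- `pyEqIntNR n v` is Python's `n == number_of_rows`: an int never equals a str.
def pyEqIntNR (n : Int) (v : Option String) : Bool :=
  match v with
  | none => n == 0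
  | some _ => false

def goA : List (List String) → List (List String) → Int → Option String → Bool → Option (List (List String))
  | [], data, _, _, _ => some data
  | row :: rest, data, count, numRows, start =>
    if start = false then
      match PySem.List.pyGet? row 0 with
      | none => none   -- IndexError on row[0] (outside Pre_)
      | some h =>
        if h = "Total records counts" then
          match PySem.List.pyGet? row 1 with
          | none => none   -- IndexError on row[1] (outside Pre_)
          | some v =>
            if pyEqIntNR 0 (some v) then none   -- `number_of_rows == 0`
            else if h = "Product" then goA rest data count (some v) true
            else goA rest data count (some v) false
        else if h = "Product" then goA rest data count numRows true
        else goA rest data count numRows false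
    else
      if pyEqIntNR count numRows then some data
      else goA rest (data ++ [row]) (count + 1) numRows start

def extractDataFrom2dArray (wholeSheetData : List (List String)) : Option (List (List String)) :=
  goA wholeSheetData [] 0 none false

-- ===== PORT B =====
-- `for i, row in enumerate(ws): if row[0] == 'Product': return ws[i+1:]`.
-- Python raises IndexError on an empty row here (outside Pre_); the port scans on.
def findProduct : List (List String) → Nat → Option Nat
  | [], _ => none
  | row :: rest, k =>
    if PySem.List.pyGet? row 0 == some "Product" then some k
    else findProduct rest (k + 1)

def extractDataFrom2dArray_alt (wholeSheetData : List (List String)) : Option (List (List String)) :=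
  match findProduct wholeSheetData 0 with
  | none => some []
  | some i => some (wholeSheetData.drop (i + 1))   -- ws[i+1:] with i+1 ≥ 0

-- ===== PRECONDITION & SPEC =====
-- Pre_ excludes exactly the inputs where A raises IndexError: an empty row, or a
-- 'Total records counts' row shorter than 2, among the rows scanned before the first
-- 'Product'-headed row.
def Pre_extractDataFrom2dArray (wholeSheetData : List (List String)) : Prop :=
  ∀ r ∈ wholeSheetData.takeWhile (fun row => row.head? != some "Product"),
    r ≠ [] ∧ (r.head? = some "Total records counts" → 2 ≤ r.length)
instance (wholeSheetData : List (List String)) : Decidable (Pre_extractDataFrom2dArray wholeSheetData) := by unfold Pre_extractDataFrom2dArray; infer_instance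

def pvWitness_extractDataFrom2dArray : List (List String) :=
  [["Total records counts", "5"], ["Product"], ["a", "b"], ["c"]]

-- On sheets whose 'Product' marker row is followed by data rows but not preceded by a
-- 'Total records counts' row, A returns [] (its number_of_rows default, the int 0, makes
-- `count == number_of_rows` fire at once — the only int ever compared, since sheet cells
-- are strings), while B returns the rows after the marker, the intended extraction.
def D_extractDataFrom2dArray (wholeSheetData : List (List String)) : Prop :=
  (wholeSheetData.takeWhile (fun row => row.head? != some "Product")).length < wholeSheetData.length ∧
  (∀ r ∈ wholeSheetData.takeWhile (fun row => row.head? != some "Product"),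
      r.head? ≠ some "Total records counts") ∧
  wholeSheetData.drop ((wholeSheetData.takeWhile (fun row => row.head? != some "Product")).length + 1) ≠ []
instance (wholeSheetData : List (List String)) : Decidable (D_extractDataFrom2dArray wholeSheetData) := by unfold D_extractDataFrom2dArray; infer_instance

def Spec_extractDataFrom2dArray (wholeSheetData : List (List String)) (out : Option (List (List String))) : Prop := ¬ D_extractDataFrom2dArray wholeSheetData → out = extractDataFrom2dArray_alt wholeSheetData
instance (wholeSheetData : List (List String)) (out : Option (List (List String))) : Decidable (Spec_extractDataFrom2dArray wholeSheetData out) := by unfold Spec_extractDataFrom2dArray; infer_instance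

def pvDiffWitness_extractDataFrom2dArray : List (List String) := [["Product"], ["a"]]
def pvDiffWitnessOut_extractDataFrom2dArray : (Option (List (List String))) × (Option (List (List String))) :=
  (some [], some [["a"]])

-- ===== CLAIM (what is proved, stated in full; the proofs are below) =====
def Claim_unchanged_extractDataFrom2dArray : Prop := ∀ (wholeSheetData : List (List String)), Dom_extractDataFrom2dArray wholeSheetData → Pre_extractDataFrom2dArray wholeSheetData → Spec_extractDataFrom2dArray wholeSheetData (extractDataFrom2dArray wholeSheetData)
def Claim_changed_extractDataFrom2dArray : Prop := Dom_extractDataFrom2dArray (pvDiffWitness_extractDataFrom2dArray) ∧ Pre_extractDataFrom2dArray (pvDiffWitness_extractDataFrom2dArray) ∧ D_extractDataFrom2dArray (pvDiffWitness_extractDataFrom2dArray) ∧ extractDataFrom2dArray (pvDiffWitness_extractDataFrom2dArray) = pvDiffWitnessOut_extractDataFrom2dArray.1 ∧ extractDataFrom2dArray_alt (pvDiffWitness_extractDataFrom2dArray) = pvDiffWitnessOut_extractDataFrom2dArray.2 ∧ pvDiffWitnessOut_extractDataFrom2dArray.1 ≠ pvDiffWitnessOut_extractDataFrom2dArray.2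
def Claim_exact_extractDataFrom2dArray : Prop := ∀ (wholeSheetData : List (List String)), Dom_extractDataFrom2dArray wholeSheetData → Pre_extractDataFrom2dArray wholeSheetData → D_extractDataFrom2dArray wholeSheetData → extractDataFrom2dArray wholeSheetData ≠ extractDataFrom2dArray_alt wholeSheetData

-- ===== LEMMAS AND PROOFS =====

theorem pyGet0_eq_head (r : List String) : PySem.List.pyGet? r 0 = r.head? := by
  cases r <;> simp [PySem.List.pyGet?, PySem.List.pyIdx?]

-- Phase 2 with number_of_rows a string: `count == number_of_rows` is never true, copy every row.
theorem goA_phase2_some (rest : List (List String)) :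
    ∀ (data : List (List String)) (count : Int) (v : String),
      goA rest data count (some v) true = some (data ++ rest) := by
  induction rest with
  | nil => intro data count v; simp [goA]
  | cons row rest ih =>
    intro data count v
    simp [goA, pyEqIntNR, ih]

-- Phase 2 with number_of_rows still the int 0: `0 == 0` stops at once.
theorem goA_phase2_none (rest data : List (List String)) :
    goA rest data 0 none true = some data := by
  cases rest <;> simp [goA, pyEqIntNR]

theorem findProduct_shift (ws : List (List String)) :
    ∀ k : Nat, findProduct ws k = (findProduct ws 0).map (· + k) := by
  induction ws with
  | nil => intro k; simp [findProduct]
  | cons row rest ih =>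
    intro k
    by_cases h : PySem.List.pyGet? row 0 == some "Product"
    · simp [findProduct, h]
    · simp only [findProduct, h, Bool.false_eq_true, if_false]
      rw [ih (k + 1), ih 1, Option.map_map]
      cases findProduct rest 0 with
      | none => simp
      | some j => simp; omega

-- findProduct locates exactly the end of the takeWhile prefix.
theorem findProduct_char (ws : List (List String)) :
    (findProduct ws 0 = none ∧
       ws.takeWhile (fun row => row.head? != some "Product") = ws) ∨
    (findProduct ws 0 =
        some (ws.takeWhile (fun row => row.head? != some "Product")).length ∧
     ws.take (ws.takeWhile (fun row => row.head? != some "Product")).length =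
        ws.takeWhile (fun row => row.head? != some "Product") ∧
     (ws.takeWhile (fun row => row.head? != some "Product")).length < ws.length) := by
  induction ws with
  | nil => left; simp [findProduct]
  | cons row rest ih =>
    by_cases h : row.head? = some "Product"
    · right
      have hfp : findProduct (row :: rest) 0 = some 0 := by
        simp [findProduct, pyGet0_eq_head, h]
      simp [List.takeWhile, h, hfp]
    · have hP : (fun row => row.head? != some "Product") row = true := by
        simp [h]
      have htw : (row :: rest).takeWhile (fun r => r.head? != some "Product")
          = row :: rest.takeWhile (fun r => r.head? != some "Product") := by
        simp [List.takeWhile, hP]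
      have hfp : findProduct (row :: rest) 0 = (findProduct rest 0).map (· + 1) := by
        have : ¬ (PySem.List.pyGet? row 0 == some "Product") = true := by
          simp [pyGet0_eq_head, h]
        simp only [findProduct, this, Bool.false_eq_true, if_false]
        exact findProduct_shift rest 1
      rcases ih with ⟨h1, h2⟩ | ⟨h1, h2, h3⟩
      · left
        constructor
        · rw [hfp, h1]; rfl
        · rw [htw, h2]
      · right
        refine ⟨?_, ?_, ?_⟩
        · rw [hfp, h1, htw]; simp
        · rw [htw]; simp [h2]
        · rw [htw]; simpa using h3

-- A's phase 1, under Pre_: A equals "suffix after the marker if a count row precedes it, else []".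
theorem goA_phase1 (ws : List (List String)) :
    ∀ (numRows : Option String),
      (∀ r ∈ ws.takeWhile (fun row => row.head? != some "Product"),
          r ≠ [] ∧ (r.head? = some "Total records counts" → 2 ≤ r.length)) →
      goA ws [] 0 numRows false =
        match findProduct ws 0 with
        | none => some []
        | some i =>
          if numRows.isSome
              || (ws.take i).any (fun r => PySem.List.pyGet? r 0 == some "Total records counts") then
            some (ws.drop (i + 1))
          else some [] := by
  induction ws with
  | nil => intro numRows _; simp [goA, findProduct]
  | cons row rest ih =>
    intro numRows hpre
    cases row with
    | nil =>
      exact absurd rfl (hpre [] (by simp)).1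
    | cons a t =>
      have hget : PySem.List.pyGet? (a :: t) 0 = some a := by
        simp [PySem.List.pyGet?, PySem.List.pyIdx?]
      by_cases hp : a = "Product"
      · have hfp : findProduct ((a :: t) :: rest) 0 = some 0 := by
          simp [findProduct, hp]
        rw [hfp]
        simp only [List.take_zero, List.any_nil, Bool.or_false, List.drop_succ_cons,
          List.drop_zero]
        cases numRows with
        | none =>
          simp only [Option.isSome_none, Bool.false_eq_true, if_false]
          simp [goA, hp, goA_phase2_none]
        | some v =>
          simp only [Option.isSome_some, if_true]
          simp [goA, hp, goA_phase2_some]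
      · -- row stays in the takeWhile prefix
        have hmem : (a :: t) ∈ ((a :: t) :: rest).takeWhile
            (fun row => row.head? != some "Product") := by
          simp [hp]
        have hrest : ∀ r ∈ rest.takeWhile (fun row => row.head? != some "Product"),
            r ≠ [] ∧ (r.head? = some "Total records counts" → 2 ≤ r.length) := by
          intro r hr
          refine hpre r ?_
          simp [hp]
          exact Or.inr hr
        by_cases hc : a = "Total records counts"
        · -- count row: Pre_ gives length ≥ 2, number_of_rows becomes the string row[1]
          have hlen : 2 ≤ (a :: t).length := (hpre _ hmem).2 (by simp [hc])
          cases t with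
          | nil => simp at hlen
          | cons b t' =>
            have hget1 : PySem.List.pyGet? (a :: b :: t') 1 = some b := by
              simp [PySem.List.pyGet?, PySem.List.pyIdx?]
            have hfp : findProduct ((a :: b :: t') :: rest) 0
                = (findProduct rest 0).map (· + 1) := by
              simp [findProduct, hp, findProduct_shift rest 1]
            have hA : goA ((a :: b :: t') :: rest) [] 0 numRows false
                = goA rest [] 0 (some b) false := by
              simp [goA, hc, pyEqIntNR]
            rw [hA, ih (some b) hrest, hfp]
            cases hr : findProduct rest 0 with
            | none => simp
            | some j =>
              simp only [Option.map_some, List.take_succ_cons, List.any_cons, hget,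
                List.drop_succ_cons]
              simp [hc]
        · -- ordinary row
          have hA : goA ((a :: t) :: rest) [] 0 numRows false
              = goA rest [] 0 numRows false := by
            simp [goA, hc, hp]
          have hfp : findProduct ((a :: t) :: rest) 0
              = (findProduct rest 0).map (· + 1) := by
            simp [findProduct, hp, findProduct_shift rest 1]
          rw [hA, ih numRows hrest, hfp]
          cases hr : findProduct rest 0 with
          | none => simp
          | some j =>
            simp only [Option.map_some, List.take_succ_cons, List.any_cons, hget,
              List.drop_succ_cons]
            simp [hc]

-- ===== VERDICT (by name: the statements are the Claim_ definitions above) =====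
theorem extractDataFrom2dArray_spec : Claim_unchanged_extractDataFrom2dArray := by
  intro ws _ hpre hnd
  unfold extractDataFrom2dArray extractDataFrom2dArray_alt
  rw [goA_phase1 ws none hpre]
  rcases findProduct_char ws with ⟨h1, _⟩ | ⟨h1, h2, h3⟩
  · rw [h1]
  · rw [h1]
    by_cases hany : (ws.take (ws.takeWhile (fun row => row.head? != some "Product")).length).any
        (fun r => PySem.List.pyGet? r 0 == some "Total records counts") = true
    · simp [hany]
    · simp only [Option.isSome_none, Bool.false_or, hany, Bool.false_eq_true, if_false]
      unfold D_extractDataFrom2dArray at hnd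
      push Not at hnd
      have hdrop := hnd h3 ?_
      · rw [hdrop]
      · intro r hr
        rw [← h2] at hr
        intro hhead
        apply hany
        rw [List.any_eq_true]
        exact ⟨r, hr, by simp [pyGet0_eq_head, hhead]⟩

theorem extractDataFrom2dArray_changed : Claim_changed_extractDataFrom2dArray := by
  unfold Claim_changed_extractDataFrom2dArray; decide

theorem extractDataFrom2dArray_tight : Claim_exact_extractDataFrom2dArray := by
  intro ws _ hpre hd
  obtain ⟨hlt, hnone, hdrop⟩ := hd
  unfold extractDataFrom2dArray extractDataFrom2dArray_alt
  rw [goA_phase1 ws none hpre]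
  rcases findProduct_char ws with ⟨_, h2⟩ | ⟨h1, h2, _⟩
  · rw [h2] at hlt; omega
  · rw [h1]
    have hany : (ws.take (ws.takeWhile (fun row => row.head? != some "Product")).length).any
        (fun r => PySem.List.pyGet? r 0 == some "Total records counts") = false := by
      rw [List.any_eq_false]
      intro r hr
      rw [h2] at hr
      simp [pyGet0_eq_head, hnone r hr]
    simp only [Option.isSome_none, Bool.false_or, hany, Bool.false_eq_true, if_false]
    intro h
    exact hdrop (by injection h with h'; exact h'.symm)
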